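-- pv_equiv track=rewrite | github.com/saatvik333/architect | services/codebase-comprehension/src/codebase_comprehension/chunker.py | _estimate_class_end
-- ===== SOURCE A (Python) =====
-- def _estimate_class_end(start_line: int, lines: list[str]) -> int:
--     """Estimate where a class ends based on indentation."""
--     if start_line < 1 or start_line > len(lines):
--         return start_line
--
--     def_line = lines[start_line - 1]
--     base_indent = len(def_line) - len(def_line.lstrip())
--
--     end = start_line
--     for i in range(start_line, len(lines)):
--         line = lines[i]
--         stripped = line.strip()
--         if stripped == "":
--             continue
--         current_indent = len(line) - len(line.lstrip())
--         if current_indent <= base_indent: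
--             break
--         end = i + 1
--
--     return end
-- ===== SOURCE B (Python) =====
-- def _estimate_class_end(start_line: int, lines: list[str]) -> int:
--     """Estimate where a class ends based on indentation."""
--     if start_line < 1 or start_line > len(lines):
--         return start_line
--
--     def_line = lines[start_line - 1]
--     base_indent = len(def_line) - len(def_line.lstrip())
--
--     # collect the indented body up to the first dedent, then trim trailing blanks
--     body = []
--     for line in lines[start_line:]:
--         if line.strip() != "" and len(line) - len(line.lstrip()) <= base_indent:
--             break
--         body.append(line)
--     k = len(body)
--     while k > 0 and body[k - 1].strip() == "":
--         k -= 1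
--     return start_line + k
-- ===== Notes on version B (the rewrite author's own statement) =====
-- stated objective: alternative
-- what changed: Replaces A's single loop that carries an 'end' accumulator with a forward scan that cuts the body at the first dedented non-blank line, followed by a backward trim of trailing blank lines.
import Mathlib
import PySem

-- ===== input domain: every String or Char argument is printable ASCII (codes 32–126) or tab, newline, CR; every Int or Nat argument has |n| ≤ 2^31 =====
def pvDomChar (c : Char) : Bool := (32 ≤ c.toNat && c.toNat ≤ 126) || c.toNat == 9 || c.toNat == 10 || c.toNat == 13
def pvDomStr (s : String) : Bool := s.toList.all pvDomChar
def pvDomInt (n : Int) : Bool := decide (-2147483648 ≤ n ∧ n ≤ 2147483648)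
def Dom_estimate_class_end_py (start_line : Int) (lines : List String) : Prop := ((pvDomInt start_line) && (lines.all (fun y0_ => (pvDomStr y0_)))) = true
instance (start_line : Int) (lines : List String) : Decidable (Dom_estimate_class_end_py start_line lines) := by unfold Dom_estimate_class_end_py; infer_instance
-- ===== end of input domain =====

-- B replaces A's single accumulator loop by a forward cut at the first dedented
-- non-blank line plus a backward trim of trailing blank lines (objective: alternative
-- decomposition, same cost).

-- indentation of a line: len(line) - len(line.lstrip())
def pvIndent (l : String) : Int := PySem.Str.len l - PySem.Str.len (PySem.Str.lstrip l)

-- ===== PORT A =====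
-- A's 'for i in range(start_line, len(lines))' walks exactly the suffix
-- lines.drop start_line.toNat with index i; ported as structural recursion over
-- that suffix carrying the index and the 'end' accumulator.
def pvALoop (base : Int) (e : Int) (i : Int) : List String → Int
  | [] => e
  | line :: rest =>
      if PySem.Str.strip line = "" then pvALoop base e (i + 1) rest
      else if pvIndent line ≤ base then e
      else pvALoop base (i + 1) (i + 1) rest

def estimate_class_end_py (start_line : Int) (lines : List String) : Int :=
  if start_line < 1 ∨ start_line > PySem.List.len lines then start_line
  else
    let def_line := PySem.List.pyGetD lines (start_line - 1) ""
    let base_indent := pvIndent def_line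
    pvALoop base_indent start_line start_line (lines.drop start_line.toNat)

-- ===== PORT B =====
-- body: lines of lines[start_line:] up to (excluding) the first non-blank line
-- whose indent is ≤ base_indent
def pvBBody (base : Int) : List String → List String
  | [] => []
  | line :: rest =>
      if PySem.Str.strip line ≠ "" ∧ pvIndent line ≤ base then []
      else line :: pvBBody base rest

-- the while loop 'while k > 0 and body[k-1].strip() == "": k -= 1', run on the
-- reversed body (each step inspects the current last element)
def pvBTrim : List String → Nat
  | [] => 0
  | line :: rest =>
      if PySem.Str.strip line = "" then pvBTrim rest else rest.length + 1

def estimate_class_end_py_alt (start_line : Int) (lines : List String) : Int :=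
  if start_line < 1 ∨ start_line > PySem.List.len lines then start_line
  else
    let def_line := PySem.List.pyGetD lines (start_line - 1) ""
    let base_indent := pvIndent def_line
    let body := pvBBody base_indent (PySem.List.slice lines (some start_line) none)
    start_line + (pvBTrim body.reverse : Int)

-- ===== PRECONDITION & SPEC =====
def Spec_estimate_class_end_py (start_line : Int) (lines : List String) (out : Int) : Prop := out = estimate_class_end_py_alt start_line lines
instance (start_line : Int) (lines : List String) (out : Int) : Decidable (Spec_estimate_class_end_py start_line lines out) := by unfold Spec_estimate_class_end_py; infer_instance

-- ===== CLAIM (what is proved, stated in full; the proofs are below) =====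
def Claim_equal_estimate_class_end_py : Prop := ∀ (start_line : Int) (lines : List String), Dom_estimate_class_end_py start_line lines → Spec_estimate_class_end_py start_line lines (estimate_class_end_py start_line lines)

-- ===== LEMMAS AND PROOFS =====

-- proof-side recursion: index (relative, 1-based) just past the last non-blank
-- line of the body, 0 if the body has no non-blank line
def pvG (base : Int) : List String → Nat
  | [] => 0
  | line :: rest =>
      if PySem.Str.strip line ≠ "" ∧ pvIndent line ≤ base then 0
      else
        let r := pvG base rest
        if r = 0 then (if PySem.Str.strip line = "" then 0 else 1) else r + 1

theorem pvALoop_eq_pvG (base : Int) (seg : List String) : ∀ (i e : Int),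
    pvALoop base e i seg = if pvG base seg = 0 then e else i + (pvG base seg : Int) := by
  induction seg with
  | nil => intro i e; simp [pvALoop, pvG]
  | cons line rest ih =>
    intro i e
    by_cases hb : PySem.Str.strip line = ""
    · have hc : ¬ (PySem.Str.strip line ≠ "" ∧ pvIndent line ≤ base) := by simp [hb]
      rw [show pvALoop base e i (line :: rest) = pvALoop base e (i + 1) rest from by
        simp [pvALoop, hb]]
      rw [show pvG base (line :: rest)
          = (if pvG base rest = 0 then 0 else pvG base rest + 1) from by
        simp [pvG, hc, hb]]
      rw [ih]
      rcases Nat.eq_zero_or_pos (pvG base rest) with h0 | hpos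
      · simp [h0]
      · have h0 : pvG base rest ≠ 0 := Nat.pos_iff_ne_zero.mp hpos
        simp [h0]
        push_cast; ring
    · by_cases hind : pvIndent line ≤ base
      · have hc : PySem.Str.strip line ≠ "" ∧ pvIndent line ≤ base := ⟨hb, hind⟩
        rw [show pvALoop base e i (line :: rest) = e from by simp [pvALoop, hb, hind]]
        rw [show pvG base (line :: rest) = 0 from by simp [pvG, hc]]
        simp
      · rw [show pvALoop base e i (line :: rest) = pvALoop base (i + 1) (i + 1) rest from by
          simp [pvALoop, hb, hind]]
        rw [show pvG base (line :: rest)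
            = (if pvG base rest = 0 then 1 else pvG base rest + 1) from by
          simp [pvG, hb, hind]]
        rw [ih]
        rcases Nat.eq_zero_or_pos (pvG base rest) with h0 | hpos
        · simp [h0]
        · have h0 : pvG base rest ≠ 0 := Nat.pos_iff_ne_zero.mp hpos
          simp [h0]
          push_cast; ring

theorem pvBTrim_append (zs : List String) (l : String) :
    pvBTrim (zs ++ [l]) =
      if pvBTrim zs = 0 then (if PySem.Str.strip l = "" then 0 else 1)
      else pvBTrim zs + 1 := by
  induction zs with
  | nil => simp [pvBTrim]
  | cons z zs ih =>
    by_cases hz : PySem.Str.strip z = ""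
    · simpa [pvBTrim, hz] using ih
    · simp [pvBTrim, hz]

theorem pvG_eq_trim (base : Int) (ys : List String) :
    pvG base ys = pvBTrim (pvBBody base ys).reverse := by
  induction ys with
  | nil => simp [pvG, pvBBody, pvBTrim]
  | cons line rest ih =>
    by_cases hc : PySem.Str.strip line ≠ "" ∧ pvIndent line ≤ base
    · simp [pvG, pvBBody, hc, pvBTrim]
    · rw [show pvBBody base (line :: rest) = line :: pvBBody base rest from by
        simp [pvBBody, hc]]
      rw [show (line :: pvBBody base rest).reverse
          = (pvBBody base rest).reverse ++ [line] from by simp]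
      rw [pvBTrim_append, ← ih]
      by_cases hb : PySem.Str.strip line = ""
      · simp [pvG, hc, hb]
      · have hind : ¬ pvIndent line ≤ base := fun h => hc ⟨hb, h⟩
        simp [pvG, hb, hind]

-- ===== VERDICT (by name: the statement is the Claim_ definition above) =====
theorem estimate_class_end_py_spec : Claim_equal_estimate_class_end_py := by
  intro start_line lines _
  show estimate_class_end_py start_line lines = estimate_class_end_py_alt start_line lines
  unfold estimate_class_end_py estimate_class_end_py_alt
  simp only [PySem.List.len_eq, gt_iff_lt]
  by_cases hg : start_line < 1 ∨ (lines.length : Int) < start_line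
  · rw [if_pos hg, if_pos hg]
  · rw [if_neg hg, if_neg hg]
    rcases not_or.mp hg with ⟨h1, h2⟩
    have hslice : PySem.List.slice lines (some start_line) none
        = lines.drop start_line.toNat := by
      rw [PySem.List.slice_some_none]
      have hs0 : ¬ start_line < 0 := by omega
      have hmin : start_line.toNat ≤ lines.length := by omega
      simp [PySem.List.clampIdx, hs0, Nat.min_eq_left hmin]
    rw [hslice]
    rw [pvALoop_eq_pvG]
    rw [pvG_eq_trim _ (lines.drop start_line.toNat)]
    set k := pvBTrim (pvBBody _ (lines.drop start_line.toNat)).reverse with hk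
    rcases Nat.eq_zero_or_pos k with h0 | hpos
    · simp [h0]
    · have h0 : k ≠ 0 := Nat.pos_iff_ne_zero.mp hpos
      simp [h0]
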